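-- pv_equiv track=rewrite | github.com/maxbeny999/sesac_prac | recap/codedump_prac.py | solution
-- ===== SOURCE A (Python) =====
-- def solution(numbers):
--     # 1. 점수판 만들기 (숫자별 등장 횟수 세기)
--     count_dict = {}
--
--     for num in numbers:
--         if num in count_dict:
--             count_dict[num] += 1  # 이미 있으면 +1
--         else:
--             count_dict[num] = 1   # 처음 보면 1로 등록
--
--     # count_dict 결과 예시: {1: 2, 3: 5, 4: 2} (3이 5번 나옴)
--
--     # 2. 가장 많이 나온 횟수(최고 기록) 찾기
--     # 딕셔너리의 값(Value)들 중에서 가장 큰 수를 찾습니다.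
--     max_frequency = max(count_dict.values())
--
--     # 3. 최고 기록을 가진 숫자들(후보)만 모으기
--     candidates = []
--     for num, count in count_dict.items():
--         if count == max_frequency:
--             candidates.append(num)
--
--     # 4. 후보들 중 가장 작은 수 찾기
--     # 문제 조건: "최빈값이 여러 개면 가장 작은 수를 반환"
--     candidates.sort() # 오름차순 정렬 (작은 게 맨 앞으로)
--
--     return candidates[0] # 맨 앞의 숫자 반환
-- ===== SOURCE B (Python) =====
-- def solution(numbers):
--     # smallest most-frequent value by sorting a copy and scanning runs of
--     # equal consecutive values; on [] sorted gives [] and we raise ValueError,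
--     # exactly as A's max() does on empty input.
--     xs = sorted(numbers)
--     if not xs:
--         raise ValueError("solution() arg is an empty sequence")
--     best_value, best_count = xs[0], 0
--     i = 0
--     n = len(xs)
--     while i < n:
--         j = i
--         while j < n and xs[j] == xs[i]:
--             j += 1
--         if j - i > best_count:
--             best_value, best_count = xs[i], j - i
--         i = j
--     return best_value
-- ===== Notes on version B (the rewrite author's own statement) =====
-- stated objective: alternative
-- what changed: Drops A's counting dictionary entirely: B sorts a copy of the list and scans it once, measuring each run of equal consecutive values and keeping the first (hence smallest) run of strictly greatest length.
import Mathlib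
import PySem

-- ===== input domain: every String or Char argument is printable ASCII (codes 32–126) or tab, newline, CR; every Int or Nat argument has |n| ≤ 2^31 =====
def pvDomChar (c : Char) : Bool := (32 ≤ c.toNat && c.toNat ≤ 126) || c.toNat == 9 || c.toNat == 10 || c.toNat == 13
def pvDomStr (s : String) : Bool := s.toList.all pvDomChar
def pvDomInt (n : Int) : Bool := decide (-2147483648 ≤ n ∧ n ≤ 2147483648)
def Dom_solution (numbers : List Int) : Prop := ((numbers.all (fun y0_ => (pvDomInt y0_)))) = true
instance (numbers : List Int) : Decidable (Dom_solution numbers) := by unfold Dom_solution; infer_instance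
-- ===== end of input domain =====

-- B drops A's counting dictionary: it sorts a copy and scans it once, keeping the
-- first (smallest) run of equal consecutive values of strictly greatest length.

-- ===== PORT A =====
def solution (numbers : List Int) : Int :=
  let count_dict := numbers.foldl
    (fun d num => if d.contains num then d.modify num 0 (· + 1) else d.insert num 1)
    (PySem.Dict.empty : PySem.Dict Int Int)
  let max_frequency := (PySem.List.max? count_dict.values (fun v => v)).getD 0
  let candidates := count_dict.items.foldl
    (fun acc p => if p.2 = max_frequency then acc ++ [p.1] else acc) ([] : List Int)
  let sortedCands := PySem.List.sorted candidates (fun x => x) false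
  (PySem.List.pyGet? sortedCands 0).getD 0

-- ===== PORT B =====
-- inner 'while j < n and xs[j] == xs[i]' loop: length of the leading run of v and the rest
def pvRunSplit (v : Int) : List Int → Nat × List Int
  | [] => (0, [])
  | x :: t => if x = v then ((pvRunSplit v t).1 + 1, (pvRunSplit v t).2) else (0, x :: t)

theorem pvRunSplit_len (v : Int) : ∀ t : List Int, (pvRunSplit v t).2.length ≤ t.length := by
  intro t
  induction t with
  | nil => simp [pvRunSplit]
  | cons x t ih =>
    by_cases h : x = v
    · simp only [pvRunSplit, if_pos h, List.length_cons]; omega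
    · simp [pvRunSplit, if_neg h]

-- outer 'while i < n' loop over runs, carrying (best_value, best_count)
def pvScan (bv bc : Int) : List Int → Int
  | [] => bv
  | x :: t =>
    let p := pvRunSplit x t
    let cnt : Int := (p.1 : Int) + 1
    if cnt > bc then pvScan x cnt p.2 else pvScan bv bc p.2
  termination_by ys => ys.length
  decreasing_by
    all_goals simpa using Nat.lt_succ_of_le (pvRunSplit_len x t)

def solution_alt (numbers : List Int) : Int :=
  let xs := PySem.List.sorted numbers (fun x => x) false
  match xs with
  | [] => 0               -- Source B raises ValueError here; outside Pre_solution
  | x0 :: t => pvScan x0 0 (x0 :: t)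

-- ===== PRECONDITION & SPEC =====
-- Pre_ excludes only the empty list, on which A raises ValueError (max() of an empty sequence).
def Pre_solution (numbers : List Int) : Prop := numbers ≠ []
instance (numbers : List Int) : Decidable (Pre_solution numbers) := by unfold Pre_solution; infer_instance
def pvWitness_solution : List Int := [1, 2, 2]

def Spec_solution (numbers : List Int) (out : Int) : Prop := out = solution_alt numbers
instance (numbers : List Int) (out : Int) : Decidable (Spec_solution numbers out) := by unfold Spec_solution; infer_instance

-- ===== CLAIM (what is proved, stated in full; the proofs are below) =====
def Claim_equal_solution : Prop := ∀ (numbers : List Int), Dom_solution numbers → Pre_solution numbers → Spec_solution numbers (solution numbers)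

-- ===== LEMMAS AND PROOFS =====

-- pvRunSplit decomposes its input into the leading run and the rest
theorem pvRunSplit_decomp (v : Int) : ∀ t : List Int,
    t = List.replicate (pvRunSplit v t).1 v ++ (pvRunSplit v t).2 := by
  intro t
  induction t with
  | nil => simp [pvRunSplit]
  | cons x t ih =>
    by_cases h : x = v
    · simp only [pvRunSplit, if_pos h, List.replicate_succ, List.cons_append]
      rw [h]; exact congrArg (v :: ·) ih
    · simp [pvRunSplit, if_neg h]

-- in a sorted list, everything after the leading run is strictly larger
theorem pvRunSplit_gt (v : Int) : ∀ t : List Int, List.Pairwise (· ≤ ·) (v :: t) →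
    ∀ y ∈ (pvRunSplit v t).2, v < y := by
  intro t
  induction t with
  | nil => simp [pvRunSplit]
  | cons x t ih =>
    intro hpw y hy
    have hvx : v ≤ x := (List.pairwise_cons.mp hpw).1 x List.mem_cons_self
    by_cases h : x = v
    · refine ih ?_ y (by simpa [pvRunSplit, if_neg, h] using hy)
      have := (List.pairwise_cons.mp hpw).2
      subst h
      exact List.pairwise_cons.mpr ⟨(List.pairwise_cons.mp this).1, (List.pairwise_cons.mp this).2⟩
    · simp only [pvRunSplit, if_neg h] at hy
      rcases List.mem_cons.mp hy with rfl | hyt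
      · omega
      · have hxy : x ≤ y := (List.pairwise_cons.mp ((List.pairwise_cons.mp hpw).2)).1 y hyt
        omega

-- full characterisation of pvScan on a sorted list
theorem pvScan_good : ∀ (N : Nat) (ys : List Int), ys.length ≤ N →
    List.Pairwise (· ≤ ·) ys → ∀ bv bc : Int,
    ((∀ v ∈ ys, (List.count v ys : Int) ≤ bc) → pvScan bv bc ys = bv) ∧
    ((∃ v ∈ ys, bc < (List.count v ys : Int)) →
      pvScan bv bc ys ∈ ys ∧ bc < (List.count (pvScan bv bc ys) ys : Int) ∧
      (∀ y ∈ ys, List.count y ys ≤ List.count (pvScan bv bc ys) ys) ∧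
      (∀ y ∈ ys, List.count y ys = List.count (pvScan bv bc ys) ys → pvScan bv bc ys ≤ y)) := by
  intro N
  induction N with
  | zero =>
    intro ys hlen hpw bv bc
    have : ys = [] := List.length_eq_zero_iff.mp (Nat.le_zero.mp hlen)
    subst this
    exact ⟨fun _ => by rw [pvScan], fun ⟨v, hv, _⟩ => absurd hv (by simp)⟩
  | succ N ih =>
    intro ys hlen hpw bv bc
    cases ys with
    | nil => exact ⟨fun _ => by rw [pvScan], fun ⟨v, hv, _⟩ => absurd hv (by simp)⟩
    | cons x t =>
      obtain ⟨n, r, hnr⟩ : ∃ n r, pvRunSplit x t = (n, r) := ⟨_, _, rfl⟩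
      have hdec : t = List.replicate n x ++ r := by
        have := pvRunSplit_decomp x t; rw [hnr] at this; exact this
      have hgt : ∀ y ∈ r, x < y := by
        have := pvRunSplit_gt x t hpw; rw [hnr] at this; exact this
      have hxr : x ∉ r := fun h => lt_irrefl x (hgt x h)
      have hpwr : List.Pairwise (· ≤ ·) r := by
        have ht : List.Pairwise (· ≤ ·) t := (List.pairwise_cons.mp hpw).2
        rw [hdec] at ht
        exact ht.sublist (List.sublist_append_right _ _)
      have hlenr : r.length ≤ N := by
        have h1 : r.length ≤ t.length := by
          have := pvRunSplit_len x t; rw [hnr] at this; exact this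
        simp only [List.length_cons] at hlen; omega
      -- counts in ys = x :: t
      have hcx : List.count x (x :: t) = n + 1 := by
        rw [hdec]
        simp [List.count_cons, List.count_append, List.count_replicate,
          List.count_eq_zero.mpr hxr]
      have hcr : ∀ y ∈ r, List.count y (x :: t) = List.count y r := by
        intro y hy
        have hxy : x < y := hgt y hy
        have hne : x ≠ y := by omega
        rw [hdec]
        simp [List.count_cons, List.count_append, List.count_replicate, hne,
          Ne.symm hne]
      have hmem : ∀ y, y ∈ (x :: t) ↔ (y = x ∨ y ∈ r) := by
        intro y
        rw [hdec]
        simp only [List.mem_cons, List.mem_append, List.mem_replicate]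
        constructor
        · rintro (rfl | ⟨_, rfl⟩ | h) <;> simp [*]
        · rintro (rfl | h) <;> simp [*]
      have hxle : ∀ y ∈ (x :: t), x ≤ y := by
        intro y hy
        rcases List.mem_cons.mp hy with rfl | hyt
        · exact le_refl _
        · exact (List.pairwise_cons.mp hpw).1 y hyt
      have hscan : pvScan bv bc (x :: t) =
          if ((n : Int) + 1) > bc then pvScan x ((n : Int) + 1) r else pvScan bv bc r := by
        rw [pvScan]
        simp only [hnr]
      by_cases hif : ((n : Int) + 1) > bc
      · -- run at x beats the current best
        rw [if_pos hif] at hscan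
        constructor
        · intro hall
          exfalso
          have := hall x List.mem_cons_self
          rw [hcx] at this; push_cast at this; omega
        · intro _
          by_cases hex : ∃ v ∈ r, ((n : Int) + 1) < (List.count v r : Int)
          · obtain ⟨-, h2, h3, h4⟩ := (ih r hlenr hpwr x ((n : Int) + 1)).2 hex
            set m := pvScan x ((n : Int) + 1) r with hm
            have hmr : m ∈ r := ((ih r hlenr hpwr x ((n : Int) + 1)).2 hex).1
            have hmys : m ∈ (x :: t) := (hmem m).mpr (Or.inr hmr)
            have hcm : List.count m (x :: t) = List.count m r := hcr m hmr
            rw [hscan]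
            refine ⟨hmys, ?_, ?_, ?_⟩
            · rw [hcm]; omega
            · intro y hy
              rcases (hmem y).mp hy with rfl | hyr
              · rw [hcx, hcm]; omega
              · rw [hcr y hyr, hcm]; exact h3 y hyr
            · intro y hy hcy
              rcases (hmem y).mp hy with rfl | hyr
              · rw [hcx, hcm] at hcy; omega
              · rw [hcr y hyr, hcm] at hcy; exact h4 y hyr hcy
          · push_neg at hex
            have hx0 : pvScan x ((n : Int) + 1) r = x :=
              (ih r hlenr hpwr x ((n : Int) + 1)).1 hex
            rw [hscan, hx0]
            refine ⟨List.mem_cons_self, ?_, ?_, fun y hy _ => hxle y hy⟩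
            · rw [hcx]; push_cast; omega
            · intro y hy
              rcases (hmem y).mp hy with rfl | hyr
              · exact le_refl _
              · have := hex y hyr
                rw [hcr y hyr, hcx]; omega
      · -- current best survives this run
        rw [if_neg hif] at hscan
        have hcnt_le : (List.count x (x :: t) : Int) ≤ bc := by rw [hcx]; push_cast; omega
        constructor
        · intro hall
          rw [hscan]
          refine (ih r hlenr hpwr bv bc).1 ?_
          intro v hv
          rw [← hcr v hv]
          exact hall v ((hmem v).mpr (Or.inr hv))
        · rintro ⟨v, hv, hvc⟩
          have hvx : v ≠ x := by rintro rfl; omega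
          have hvr : v ∈ r := by
            rcases (hmem v).mp hv with rfl | h
            · exact absurd rfl hvx
            · exact h
          have hexr : ∃ v ∈ r, bc < (List.count v r : Int) :=
            ⟨v, hvr, by rw [← hcr v hvr]; exact hvc⟩
          obtain ⟨h1, h2, h3, h4⟩ := (ih r hlenr hpwr bv bc).2 hexr
          set m := pvScan bv bc r with hm
          have hcm : List.count m (x :: t) = List.count m r := hcr m h1
          rw [hscan]
          refine ⟨(hmem m).mpr (Or.inr h1), by rw [hcm]; omega, ?_, ?_⟩
          · intro y hy
            rcases (hmem y).mp hy with rfl | hyr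
            · rw [hcx, hcm]; omega
            · rw [hcr y hyr, hcm]; exact h3 y hyr
          · intro y hy hcy
            rcases (hmem y).mp hy with rfl | hyr
            · rw [hcx, hcm] at hcy; omega
            · rw [hcr y hyr, hcm] at hcy; exact h4 y hyr hcy

-- A's counting loop builds exactly PySem.Dict.counter
theorem pv_fold_eq_counter (numbers : List Int) :
    numbers.foldl
      (fun d num => if d.contains num then d.modify num 0 (· + 1) else d.insert num 1)
      (PySem.Dict.empty : PySem.Dict Int Int) = PySem.Dict.counter numbers := by
  unfold PySem.Dict.counter
  apply PySem.List.foldl_congr_mem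
  intro d x _
  by_cases hcx : d.contains x = true
  · simp [hcx]
  · have hget : d.get? x = none := by
      simp only [PySem.Dict.contains, List.any_eq_true] at hcx
      simp only [PySem.Dict.get?, Option.map_eq_none_iff, List.find?_eq_none]
      exact fun p hp hb => hcx ⟨p, hp, hb⟩
    simp [hcx, PySem.Dict.modify, PySem.Dict.getD, hget]

-- ===== VERDICT (by name: the statement is the Claim_ definition above) =====
theorem solution_spec : Claim_equal_solution := by
  intro numbers _ hpre
  unfold Spec_solution solution solution_alt
  simp only []
  -- ---------- A's side: head of sorted candidates ----------
  set D : List Int := PySem.Set.ofList numbers with hD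
  set c : Int → Int := fun k => ((List.count k numbers : Nat) : Int) with hc
  rw [pv_fold_eq_counter]
  have hitems : (PySem.Dict.counter numbers).items = D.map (fun k => (k, c k)) :=
    PySem.Dict.items_counter numbers
  have hvalues : (PySem.Dict.counter numbers).values = D.map c := by
    simp [PySem.Dict.values, hitems, Function.comp]
  have hDne : D ≠ [] := by
    cases numbers with
    | nil => exact absurd rfl hpre
    | cons x t =>
      intro h
      have : x ∈ D := (PySem.Set.mem_ofList _ _).mpr List.mem_cons_self
      rw [h] at this; simp at this
  have hvne : (PySem.Dict.counter numbers).values ≠ [] := by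
    rw [hvalues]; simpa using hDne
  obtain ⟨M, hM⟩ : ∃ M, PySem.List.max? (PySem.Dict.counter numbers).values (fun v => v) = some M := by
    cases hmx : PySem.List.max? (PySem.Dict.counter numbers).values (fun v => v) with
    | none => exact absurd ((PySem.List.max?_eq_none_iff _ _).mp hmx) hvne
    | some M => exact ⟨M, rfl⟩
  have hMmem : M ∈ (PySem.Dict.counter numbers).values := PySem.List.max?_mem hM
  have hMmax : ∀ y ∈ (PySem.Dict.counter numbers).values, y ≤ M := by
    intro y hy; exact PySem.List.max?_isMax hM y hy
  have hMle : ∀ k ∈ D, c k ≤ M := by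
    intro k hk
    exact hMmax (c k) (by rw [hvalues]; exact List.mem_map_of_mem hk)
  rw [hM]
  simp only [Option.getD_some]
  rw [hitems, List.foldl_map]
  simp only
  rw [PySem.List.foldl_append_ite_eq_filter (fun k => c k = M) D []]
  simp only [List.nil_append]
  set cands : List Int := D.filter (fun k => decide (c k = M)) with hcands
  have hcandne : cands ≠ [] := by
    rw [hvalues] at hMmem
    obtain ⟨k0, hk0, hck0⟩ := List.mem_map.mp hMmem
    intro h
    have : k0 ∈ cands := List.mem_filter.mpr ⟨hk0, by simp [hck0]⟩
    rw [h] at this; simp at this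
  cases hs : PySem.List.sorted cands (fun x => x) false with
  | nil => exact absurd ((PySem.List.sorted_eq_nil_iff _ _ _).mp hs) hcandne
  | cons a ta =>
    have haC : a ∈ cands := by
      rw [← PySem.List.mem_sorted cands (fun x => x) false a, hs]; exact List.mem_cons_self
    have haD : a ∈ D := (List.mem_filter.mp haC).1
    have hacM : c a = M := by
      have := (List.mem_filter.mp haC).2; simpa using this
    have hamin : ∀ y ∈ cands, a ≤ y := PySem.List.key_head_sorted_le cands (fun x => x) hs
    -- ---------- B's side: run scan of the sorted list ----------
    set ys : List Int := PySem.List.sorted numbers (fun x => x) false with hys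
    have hperm : ys.Perm numbers := PySem.List.sorted_perm numbers (fun x => x) false
    have hpw : List.Pairwise (· ≤ ·) ys := PySem.List.sorted_pairwise numbers (fun x => x)
    have hcnt : ∀ y, List.count y ys = List.count y numbers := fun y => hperm.count_eq y
    have hmemys : ∀ y, y ∈ ys ↔ y ∈ numbers := fun y => hperm.mem_iff
    cases hysc : ys with
    | nil =>
      exact absurd (hysc ▸ hperm).symm.eq_nil hpre
    | cons x0 t0 =>
      have hx0ys : x0 ∈ ys := by rw [hysc]; exact List.mem_cons_self
      have hex : ∃ v ∈ (x0 :: t0), (0 : Int) < (List.count v (x0 :: t0) : Int) := by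
        refine ⟨x0, List.mem_cons_self, ?_⟩
        have : 0 < List.count x0 (x0 :: t0) := List.count_pos_iff.mpr List.mem_cons_self
        exact_mod_cast this
      have hpw0 : List.Pairwise (· ≤ ·) (x0 :: t0) := hysc ▸ hpw
      obtain ⟨h1, _, h3, h4⟩ :=
        (pvScan_good (x0 :: t0).length (x0 :: t0) le_rfl hpw0 x0 0).2 hex
      set m := pvScan x0 0 (x0 :: t0) with hm
      -- transfer B's properties to `numbers`
      have hmnum : m ∈ numbers := by rw [← hmemys m, hysc]; exact h1
      have hcnt0 : ∀ y, List.count y (x0 :: t0) = List.count y numbers := by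
        intro y; rw [← hysc]; exact hcnt y
      have hmD : m ∈ D := (PySem.Set.mem_ofList _ _).mpr hmnum
      -- c a = c m = M
      have hanum : a ∈ numbers := (PySem.Set.mem_ofList _ _).mp haD
      have hays : a ∈ (x0 :: t0) := by rw [← hysc, hmemys]; exact hanum
      have hcam : List.count a (x0 :: t0) ≤ List.count m (x0 :: t0) := h3 a hays
      have hmleM : c m ≤ M := hMle m hmD
      have hcmM : c m = M := by
        have h1' : c a ≤ c m := by
          simp only [hc]
          rw [← hcnt0 a, ← hcnt0 m]
          exact_mod_cast hcam
        omega
      -- a ≤ m (a is min of A's candidates; m is a candidate)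
      have hmcand : m ∈ cands := List.mem_filter.mpr ⟨hmD, by simp [hcmM]⟩
      have ham : a ≤ m := hamin m hmcand
      -- m ≤ a (B's tie rule: smallest with maximal count)
      have hma : m ≤ a := by
        refine h4 a hays ?_
        have : List.count a numbers = List.count m numbers := by
          have := hcmM; have := hacM
          simp only [hc] at *
          omega
        rw [hcnt0 a, hcnt0 m, this]
      have : a = m := le_antisymm ham hma
      simp [PySem.List.pyGet?, PySem.List.pyIdx?, this, ← hm]
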